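-- pv_equiv track=rewrite | github.com/Park-Young-Hun/Algorithm | Python/BaekJoon/토마토_7569.py | solution
-- ===== SOURCE A (Python) =====
-- from collections import deque
--
-- def solution(n, m, h, storage):
--     day = 0
--     unripe_cnt = 0
--     q = deque()
--     delta = [
--         (1, 0, 0), (-1, 0, 0), (0, 1, 0),
--         (0, -1, 0), (0, 0, 1), (0, 0, -1)
--     ]
--
--     for i in range(h):
--         for j in range(m):
--             for k in range(n):
--                 if storage[i][j][k] == 1:
--                     q.append((i, j, k))
--                 elif storage[i][j][k] == 0:
--                     unripe_cnt += 1
--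
--     if unripe_cnt == 0:
--         return day
--
--     while q:
--         for _ in range(len(q)):
--             height, row, col = q.popleft()
--
--             for delta_h, delta_row, delta_col in delta:
--                 new_height = height + delta_h
--                 new_row = row + delta_row
--                 new_col = col + delta_col
--
--                 if new_height < 0 or new_height >= h or new_row < 0 or new_row >= m or new_col < 0 or new_col >= n:
--                     continue
--                 if storage[new_height][new_row][new_col] == 0:
--                     q.append((new_height, new_row, new_col))
--                     storage[new_height][new_row][new_col] = 1
--                     unripe_cnt -= 1
--         if q:
--             day += 1
--
--     if unripe_cnt > 0:
--         return -1
--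
--     return day
-- ===== SOURCE B (Python) =====
-- def solution(n, m, h, storage):
--     cells = [(i, j, k) for i in range(h) for j in range(m) for k in range(n)]
--     deltas = ((1, 0, 0), (-1, 0, 0), (0, 1, 0), (0, -1, 0), (0, 0, 1), (0, 0, -1))
--     day = 0
--     while True:
--         ripen = [(i, j, k) for (i, j, k) in cells
--                  if storage[i][j][k] == 0 and any(
--                      0 <= i + di < h and 0 <= j + dj < m and 0 <= k + dk < n
--                      and storage[i + di][j + dj][k + dk] == 1
--                      for di, dj, dk in deltas)]
--         if not ripen:
--             break
--         for i, j, k in ripen: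
--             storage[i][j][k] = 1
--         day += 1
--     if any(storage[i][j][k] == 0 for i, j, k in cells):
--         return -1
--     return day
-- ===== Notes on version B (the rewrite author's own statement) =====
-- stated objective: alternative
-- what changed: Replaces the queue-based multi-source BFS (deque, per-node pops, unripe counter) with a queue-free synchronous cellular sweep: each day the whole grid is rescanned for unripe cells adjacent to a ripe one, they are ripened in one batch, and the loop stops at the first unproductive sweep; -1 is decided by a final rescan for remaining zeros instead of a maintained counter.
import Mathlib
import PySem

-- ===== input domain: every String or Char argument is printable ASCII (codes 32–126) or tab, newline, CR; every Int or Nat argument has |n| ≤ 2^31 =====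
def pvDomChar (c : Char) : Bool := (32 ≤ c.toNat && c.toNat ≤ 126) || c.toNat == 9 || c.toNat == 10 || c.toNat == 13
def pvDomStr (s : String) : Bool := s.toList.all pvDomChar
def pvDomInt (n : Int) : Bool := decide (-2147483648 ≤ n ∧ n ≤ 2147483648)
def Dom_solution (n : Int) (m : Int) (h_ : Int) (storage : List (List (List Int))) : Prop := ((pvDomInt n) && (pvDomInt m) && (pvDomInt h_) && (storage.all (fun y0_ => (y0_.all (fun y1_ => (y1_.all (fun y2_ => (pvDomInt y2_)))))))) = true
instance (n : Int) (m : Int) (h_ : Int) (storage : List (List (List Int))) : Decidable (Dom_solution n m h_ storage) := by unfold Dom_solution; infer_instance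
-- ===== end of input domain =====

-- B replaces A's queue-based multi-source BFS (deque, per-node pops, unripe counter) by a
-- queue-free synchronous sweep: each day the whole grid is rescanned for unripe cells adjacent
-- to a ripe one, ripened in one batch, and -1 is decided by a final rescan for remaining zeros.
-- Both Pythons mutate `storage` in place identically; the equivalence proved is about the return value.

-- ===== PORT A =====
-- shared cell helpers (both Pythons index cells, test bounds and assign cells the same way)
def pvDeltas : List (Int × Int × Int) :=
  [(1, 0, 0), (-1, 0, 0), (0, 1, 0), (0, -1, 0), (0, 0, 1), (0, 0, -1)]

def pvNbr (p d : Int × Int × Int) : Int × Int × Int :=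
  (p.1 + d.1, p.2.1 + d.2.1, p.2.2 + d.2.2)

abbrev pvInb (n m h_ : Int) (c : Int × Int × Int) : Prop :=
  0 ≤ c.1 ∧ c.1 < h_ ∧ 0 ≤ c.2.1 ∧ c.2.1 < m ∧ 0 ≤ c.2.2 ∧ c.2.2 < n

-- storage[i][j][k]; `none` exactly where Python raises IndexError (excluded by Pre_)
def pvGet? (g : List (List (List Int))) (c : Int × Int × Int) : Option Int :=
  if 0 ≤ c.1 ∧ 0 ≤ c.2.1 ∧ 0 ≤ c.2.2 then
    g[c.1.toNat]?.bind fun L => L[c.2.1.toNat]?.bind fun r => r[c.2.2.toNat]?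
  else none

-- storage[i][j][k] = v; only ever invoked on in-bounds nonnegative indices in both ports
def pvSet (g : List (List (List Int))) (c : Int × Int × Int) (v : Int) : List (List (List Int)) :=
  let L := g.getD c.1.toNat []
  let r := L.getD c.2.1.toNat []
  g.set c.1.toNat (L.set c.2.1.toNat (r.set c.2.2.toNat v))

-- the scan order of B's `cells` comprehension; also the index set of the termination measure
def pvCells (n m h_ : Int) : List (Int × Int × Int) :=
  (PySem.List.pyRange 0 h_ 1).flatMap fun i =>
    (PySem.List.pyRange 0 m 1).flatMap fun j =>
      (PySem.List.pyRange 0 n 1).map fun k => (i, j, k)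

-- number of in-bounds unripe cells: termination measure of both loops
def pvZ (n m h_ : Int) (g : List (List (List Int))) : Nat :=
  (pvCells n m h_).countP fun c => decide (pvGet? g c = some 0)

-- "mark this set of cells ripe": normal form of a batch of pvSet _ _ 1 writes
def pvMark (P : Int × Int × Int → Bool) (g : List (List (List Int))) : List (List (List Int)) :=
  g.mapIdx fun i L => L.mapIdx fun j r => r.mapIdx fun k v =>
    if P ((i : Int), (j : Int), (k : Int)) then 1 else v

theorem pv_mapIdx_id {α : Type} (l : List α) : l.mapIdx (fun _ a => a) = l := by
  induction l with
  | nil => rfl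
  | cons x xs ih => rw [List.mapIdx_cons]; exact congrArg (x :: ·) ih

theorem pv_set_eq_mapIdx {α : Type} (l : List α) (i : Nat) (a : α) :
    l.set i a = l.mapIdx fun j w => if j = i then a else w := by
  induction l generalizing i with
  | nil => rfl
  | cons x xs ih =>
    cases i with
    | zero => simp [List.mapIdx_cons, pv_mapIdx_id]
    | succ t =>
      have hf : (fun (j : Nat) (w : α) => if j + 1 = t + 1 then a else w)
          = fun (j : Nat) (w : α) => if j = t then a else w := by
        funext j w
        simp [Nat.add_right_cancel_iff]
      simp only [List.set, List.mapIdx_cons, if_neg (by omega : ¬(0 = t + 1)), hf]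
      exact congrArg (x :: ·) (ih t)

theorem pvMark_congr {P Q : Int × Int × Int → Bool} (h : ∀ c, P c = Q c)
    (g : List (List (List Int))) : pvMark P g = pvMark Q g := by
  have : P = Q := funext h
  rw [this]

theorem pvMark_false {P : Int × Int × Int → Bool} (h : ∀ c, P c = false)
    (g : List (List (List Int))) : pvMark P g = g := by
  unfold pvMark
  calc g.mapIdx _ = g.mapIdx (fun _ L => L) := by
        refine List.mapIdx_eq_mapIdx_iff.mpr fun i hi => ?_
        calc (g[i].mapIdx fun j r => r.mapIdx fun k v =>
                if P ((i : Int), (j : Int), (k : Int)) then 1 else v)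
            = g[i].mapIdx (fun _ r => r) := by
              refine List.mapIdx_eq_mapIdx_iff.mpr fun j hj => ?_
              simp [h, pv_mapIdx_id]
          _ = g[i] := pv_mapIdx_id _
    _ = g := pv_mapIdx_id g

theorem pvMark_mark (P Q : Int × Int × Int → Bool) (g : List (List (List Int))) :
    pvMark P (pvMark Q g) = pvMark (fun c => P c || Q c) g := by
  unfold pvMark
  simp only [List.mapIdx_mapIdx, Function.comp]
  refine List.mapIdx_eq_mapIdx_iff.mpr fun i hi => ?_
  simp only [List.mapIdx_mapIdx, Function.comp]
  refine List.mapIdx_eq_mapIdx_iff.mpr fun j hj => ?_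
  simp only [List.mapIdx_mapIdx, Function.comp]
  refine List.mapIdx_eq_mapIdx_iff.mpr fun k hk => ?_
  by_cases hp : P ((i : Int), (j : Int), (k : Int)) <;>
    by_cases hq : Q ((i : Int), (j : Int), (k : Int)) <;> simp [hp, hq]

theorem pvGet_mark (P : Int × Int × Int → Bool) (g : List (List (List Int)))
    (c : Int × Int × Int) :
    pvGet? (pvMark P g) c = (pvGet? g c).map fun v => if P c then 1 else v := by
  unfold pvGet? pvMark
  by_cases hc : 0 ≤ c.1 ∧ 0 ≤ c.2.1 ∧ 0 ≤ c.2.2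
  · simp only [if_pos hc, List.getElem?_mapIdx]
    obtain ⟨h1, h2, h3⟩ := hc
    cases hL : g[c.1.toNat]? with
    | none => rfl
    | some L =>
      simp only [Option.map_some, Option.bind_some, List.getElem?_mapIdx]
      cases hr : L[c.2.1.toNat]? with
      | none => rfl
      | some r =>
        simp only [Option.map_some, Option.bind_some, List.getElem?_mapIdx]
        cases hv : r[c.2.2.toNat]? with
        | none => rfl
        | some v =>
          simp only [Option.map_some]
          congr 1
          rw [Int.toNat_of_nonneg h1, Int.toNat_of_nonneg h2, Int.toNat_of_nonneg h3]
  · simp [if_neg hc]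

theorem pv_mapIdx_nofire {α : Type} (l : List α) (P : Nat → Bool) (f : Nat → α)
    (h : ∀ i, P i = false) : (l.mapIdx fun i v => if P i then f i else v) = l := by
  calc (l.mapIdx fun i v => if P i then f i else v) = l.mapIdx (fun _ v => v) := by
        refine List.mapIdx_eq_mapIdx_iff.mpr fun i hi => by simp [h]
    _ = l := pv_mapIdx_id l

theorem pvSet_eq_mark (g : List (List (List Int))) (c : Int × Int × Int)
    (h1 : 0 ≤ c.1) (h2 : 0 ≤ c.2.1) (h3 : 0 ≤ c.2.2) :
    pvSet g c 1 = pvMark (fun x => decide (x = c)) g := by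
  obtain ⟨c1, c2, c3⟩ := c
  simp only [] at h1 h2 h3
  unfold pvSet pvMark
  rw [pv_set_eq_mapIdx]
  refine List.mapIdx_eq_mapIdx_iff.mpr fun i hi => ?_
  by_cases hic : i = c1.toNat
  · subst hic
    simp only [if_pos rfl, List.getD, List.getElem?_eq_getElem hi, Option.getD_some]
    rw [pv_set_eq_mapIdx]
    refine List.mapIdx_eq_mapIdx_iff.mpr fun j hj => ?_
    by_cases hjc : j = c2.toNat
    · subst hjc
      simp only [if_pos rfl, List.getD, List.getElem?_eq_getElem hj, Option.getD_some]
      rw [pv_set_eq_mapIdx]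
      refine List.mapIdx_eq_mapIdx_iff.mpr fun k hk => ?_
      by_cases hkc : k = c3.toNat
      · subst hkc
        have : ((c1.toNat : Int), (c2.toNat : Int), (c3.toNat : Int)) = (c1, c2, c3) := by
          rw [Int.toNat_of_nonneg h1, Int.toNat_of_nonneg h2, Int.toNat_of_nonneg h3]
        rw [this]
        simp
      · have : ¬(((c1.toNat : Int), (c2.toNat : Int), (k : Int)) = (c1, c2, c3)) := by
          intro hq
          apply hkc
          have := congrArg (fun t => t.2.2) hq
          simp at this
          omega
        rw [if_neg hkc]
        simp only [decide_eq_false this, Bool.false_eq_true, if_false]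
    · have : ∀ k : Nat, decide (((c1.toNat : Int), (j : Int), (k : Int)) = (c1, c2, c3)) = false := by
        intro k
        simp only [decide_eq_false_iff_not]
        intro hq
        apply hjc
        have := congrArg (fun t => t.2.1) hq
        simp at this
        omega
      rw [if_neg hjc]
      exact (pv_mapIdx_nofire _ _ _ this).symm
  · have : ∀ (j k : Nat), decide (((i : Int), (j : Int), (k : Int)) = (c1, c2, c3)) = false := by
      intro j k
      simp only [decide_eq_false_iff_not]
      intro hq
      apply hic
      have := congrArg (fun t => t.1) hq
      simp at this
      omega
    rw [if_neg hic]
    refine ((List.mapIdx_eq_mapIdx_iff.mpr fun j hj => ?_).trans (pv_mapIdx_id _)).symm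
    exact pv_mapIdx_nofire _ _ _ (this j)

-- a batch of ripening writes is a single mark
theorem pvApply_mark (l : List (Int × Int × Int)) :
    ∀ (P : Int × Int × Int → Bool) (g : List (List (List Int))),
      (∀ c ∈ l, 0 ≤ c.1 ∧ 0 ≤ c.2.1 ∧ 0 ≤ c.2.2) →
      l.foldl (fun g c => pvSet g c 1) (pvMark P g)
        = pvMark (fun x => P x || decide (x ∈ l)) g := by
  induction l with
  | nil => intro P g _; simp only [List.foldl_nil]
           exact pvMark_congr (by simp) g
  | cons c l ih =>
    intro P g hl
    obtain ⟨hc, hl'⟩ := List.forall_mem_cons.mp hl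
    simp only [List.foldl_cons]
    rw [pvSet_eq_mark _ _ hc.1 hc.2.1 hc.2.2, pvMark_mark,
      ih _ g hl']
    refine pvMark_congr (fun x => ?_) g
    by_cases hx : x = c <;> by_cases hm : x ∈ l <;> simp [hx, hm]

theorem pvApply_eq_mark (l : List (Int × Int × Int)) (g : List (List (List Int)))
    (h : ∀ c ∈ l, 0 ≤ c.1 ∧ 0 ≤ c.2.1 ∧ 0 ≤ c.2.2) :
    l.foldl (fun g c => pvSet g c 1) g = pvMark (fun x => decide (x ∈ l)) g := by
  have := pvApply_mark l (fun _ => false) g h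
  rw [pvMark_false (fun _ => rfl) g] at this
  rw [this]
  exact pvMark_congr (by simp) g

theorem pv_mem_cells (n m h_ : Int) (c : Int × Int × Int) :
    c ∈ pvCells n m h_ ↔ pvInb n m h_ c := by
  constructor
  · intro hc
    rw [pvCells] at hc
    simp only [List.mem_flatMap, List.mem_map] at hc
    obtain ⟨i, hi, j, hj, k, hk, rfl⟩ := hc
    rw [PySem.List.mem_pyRange_one] at hi hj hk
    exact ⟨hi.1, hi.2, hj.1, hj.2, hk.1, hk.2⟩
  · intro hin
    obtain ⟨i, j, k⟩ := c
    obtain ⟨h1, h2, h3, h4, h5, h6⟩ := hin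
    rw [pvCells]
    simp only [List.mem_flatMap, List.mem_map]
    exact ⟨i, PySem.List.mem_pyRange_one.mpr ⟨h1, h2⟩,
      j, PySem.List.mem_pyRange_one.mpr ⟨h3, h4⟩,
      k, PySem.List.mem_pyRange_one.mpr ⟨h5, h6⟩, rfl⟩



-- countP drops strictly under a pointwise-smaller predicate that loses a member
theorem pv_countP_succ_le {α : Type} (l : List α) (p p' : α → Bool) (c : α)
    (hc : c ∈ l) (h1 : p c = true) (h2 : p' c = false)
    (hm : ∀ x, p' x = true → p x = true) :
    l.countP p' + 1 ≤ l.countP p := by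
  obtain ⟨s, t, rfl⟩ := List.append_of_mem hc
  have hs : s.countP p' ≤ s.countP p := List.countP_mono_left (fun x _ => hm x)
  have ht : t.countP p' ≤ t.countP p := List.countP_mono_left (fun x _ => hm x)
  simp [List.countP_append, List.countP_cons, h1, h2]
  omega



-- setting an in-bounds unripe cell ripe decreases the measure
theorem pvZ_set_lt (n m h_ : Int) (g : List (List (List Int))) (c : Int × Int × Int)
    (hin : pvInb n m h_ c) (h0 : pvGet? g c = some 0) :
    pvZ n m h_ (pvSet g c 1) + 1 ≤ pvZ n m h_ g := by
  obtain ⟨a1, a2, a3, a4, a5, a6⟩ := hin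
  rw [pvSet_eq_mark g c a1 a3 a5]
  refine pv_countP_succ_le _ _ _ c ((pv_mem_cells n m h_ c).mpr ⟨a1, a2, a3, a4, a5, a6⟩)
    (by simp [h0]) ?_ ?_
  · simp [pvGet_mark, h0]
  · intro x hx
    simp only [decide_eq_true_eq] at hx ⊢
    rw [pvGet_mark] at hx
    by_cases hxc : x = c
    · subst hxc; rw [h0] at hx; simp at hx
    · cases hg : pvGet? g x with
      | none => rw [hg] at hx; simp at hx
      | some v => rw [hg] at hx; simp [hxc] at hx; simp [hg, hx]



-- ----- A's code -----
-- the initial triple scan: ripe queue in scan order, unripe count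
def pvScan (n m h_ : Int) (storage : List (List (List Int))) :
    List (Int × Int × Int) × Int :=
  (PySem.List.pyRange 0 h_ 1).foldl (fun acc i =>
    (PySem.List.pyRange 0 m 1).foldl (fun acc j =>
      (PySem.List.pyRange 0 n 1).foldl (fun acc k =>
        let v := pvGet? storage (i, j, k)
        if v = some 1 then (acc.1 ++ [(i, j, k)], acc.2)
        else if v = some 0 then (acc.1, acc.2 + 1)
        else acc) acc) acc) ([], (0 : Int))

-- body of `for delta_h, delta_row, delta_col in delta: …`
def stepA (n m h_ : Int) (p : Int × Int × Int)
    (st : List (List (List Int)) × List (Int × Int × Int) × Int) (d : Int × Int × Int) :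
    List (List (List Int)) × List (Int × Int × Int) × Int :=
  let c := pvNbr p d
  if c.1 < 0 ∨ c.1 ≥ h_ ∨ c.2.1 < 0 ∨ c.2.1 ≥ m ∨ c.2.2 < 0 ∨ c.2.2 ≥ n then st
  else if pvGet? st.1 c = some 0 then (pvSet st.1 c 1, st.2.1 ++ [c], st.2.2 - 1)
  else st

theorem pv_stepA_meas (n m h_ : Int) (p : Int × Int × Int)
    (st : List (List (List Int)) × List (Int × Int × Int) × Int) (d : Int × Int × Int) :
    pvZ n m h_ (stepA n m h_ p st d).1 + (stepA n m h_ p st d).2.1.length ≤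
        pvZ n m h_ st.1 + st.2.1.length ∧
    pvZ n m h_ (stepA n m h_ p st d).1 ≤ pvZ n m h_ st.1 ∧
    st.2.1.length ≤ (stepA n m h_ p st d).2.1.length := by
  unfold stepA
  set c := pvNbr p d with hc
  by_cases hb : c.1 < 0 ∨ c.1 ≥ h_ ∨ c.2.1 < 0 ∨ c.2.1 ≥ m ∨ c.2.2 < 0 ∨ c.2.2 ≥ n
  · simp [hb]
  · simp only [if_neg hb]
    by_cases h0 : pvGet? st.1 c = some 0
    · have hin : pvInb n m h_ c := by
        unfold pvInb; push_neg at hb; omega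
      have hz := pvZ_set_lt n m h_ st.1 c hin h0
      simp only [if_pos h0, List.length_append, List.length_cons, List.length_nil]
      omega
    · simp [h0]

theorem pv_foldA_meas (n m h_ : Int) (p : Int × Int × Int) :
    ∀ (ds : List (Int × Int × Int))
      (st : List (List (List Int)) × List (Int × Int × Int) × Int),
      pvZ n m h_ (ds.foldl (stepA n m h_ p) st).1 +
          (ds.foldl (stepA n m h_ p) st).2.1.length ≤ pvZ n m h_ st.1 + st.2.1.length ∧
      pvZ n m h_ (ds.foldl (stepA n m h_ p) st).1 ≤ pvZ n m h_ st.1 ∧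
      st.2.1.length ≤ (ds.foldl (stepA n m h_ p) st).2.1.length := by
  intro ds
  induction ds with
  | nil => intro st; exact ⟨le_refl _, le_refl _, le_refl _⟩
  | cons d ds ih =>
    intro st
    simp only [List.foldl_cons]
    have h1 := pv_stepA_meas n m h_ p st d
    have h2 := ih (stepA n m h_ p st d)
    omega

-- A's `for _ in range(len(q))` wave: pop left, expand, append right, t times
def innerA (n m h_ : Int) :
    Nat → List (List (List Int)) → List (Int × Int × Int) → Int →
      List (List (List Int)) × List (Int × Int × Int) × Int
  | 0, g, q, u => (g, q, u)
  | Nat.succ t, g, q, u =>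
    match q with
    | [] => (g, [], u)
    | p :: q' =>
      let st := pvDeltas.foldl (stepA n m h_ p) (g, q', u)
      innerA n m h_ t st.1 st.2.1 st.2.2

theorem pv_innerA_meas (n m h_ : Int) :
    ∀ (k : Nat) (g : List (List (List Int))) (q : List (Int × Int × Int)) (u : Int),
      k ≤ q.length →
      pvZ n m h_ (innerA n m h_ k g q u).1 + (innerA n m h_ k g q u).2.1.length + k ≤
          pvZ n m h_ g + q.length ∧
      pvZ n m h_ (innerA n m h_ k g q u).1 ≤ pvZ n m h_ g := by
  intro k
  induction k with
  | zero => intro g q u _; simp [innerA]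
  | succ t ih =>
    intro g q u hk
    cases q with
    | nil => simp at hk
    | cons p q' =>
      simp only [innerA]
      have hf := pv_foldA_meas n m h_ p pvDeltas (g, q', u)
      dsimp only at hf
      have hk' : t ≤ (pvDeltas.foldl (stepA n m h_ p) (g, q', u)).2.1.length := by
        simp only [List.length_cons] at hk
        omega
      have := ih (pvDeltas.foldl (stepA n m h_ p) (g, q', u)).1
        (pvDeltas.foldl (stepA n m h_ p) (g, q', u)).2.1
        (pvDeltas.foldl (stepA n m h_ p) (g, q', u)).2.2 hk'
      simp only [List.length_cons] at *
      omega

-- A's `while q:` loop; returns (unripe_cnt, day)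
def loopA (n m h_ : Int) (g : List (List (List Int))) (q : List (Int × Int × Int))
    (u day : Int) : Int × Int :=
  if hq : q = [] then (u, day)
  else
    let st := innerA n m h_ q.length g q u
    loopA n m h_ st.1 st.2.1 st.2.2 (if st.2.1 = [] then day else day + 1)
termination_by 2 * pvZ n m h_ g + q.length
decreasing_by
  have h := pv_innerA_meas n m h_ q.length g q u (le_refl _)
  have hq1 : 1 ≤ q.length := by
    cases q with
    | nil => exact absurd rfl hq
    | cons a l => simp
  omega

def solution (n : Int) (m : Int) (h_ : Int) (storage : List (List (List Int))) : Int :=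
  let s := pvScan n m h_ storage
  if s.2 = 0 then 0
  else
    let r := loopA n m h_ storage s.1 s.2 0
    if r.1 > 0 then -1 else r.2

-- ===== PORT B =====
-- one synchronous sweep: every unripe in-bounds cell adjacent to a ripe one, in scan order
def sweepList (n m h_ : Int) (g : List (List (List Int))) : List (Int × Int × Int) :=
  (pvCells n m h_).filter fun c =>
    decide (pvGet? g c = some 0) &&
      pvDeltas.any fun d =>
        decide (pvInb n m h_ (pvNbr c d)) && decide (pvGet? g (pvNbr c d) = some 1)

-- `for i, j, k in ripen: storage[i][j][k] = 1`
def applyRipen (g : List (List (List Int))) (l : List (Int × Int × Int)) :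
    List (List (List Int)) :=
  l.foldl (fun g c => pvSet g c 1) g

theorem pv_sweep_mem (n m h_ : Int) (g : List (List (List Int))) (c : Int × Int × Int) :
    c ∈ sweepList n m h_ g ↔
      pvInb n m h_ c ∧ pvGet? g c = some 0 ∧
        ∃ d ∈ pvDeltas, pvInb n m h_ (pvNbr c d) ∧ pvGet? g (pvNbr c d) = some 1 := by
  simp [sweepList, List.mem_filter, pv_mem_cells, List.any_eq_true, and_assoc]

theorem pv_sweep_apply_lt (n m h_ : Int) (g : List (List (List Int)))
    (hne : sweepList n m h_ g ≠ []) :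
    pvZ n m h_ (applyRipen g (sweepList n m h_ g)) < pvZ n m h_ g := by
  set R := sweepList n m h_ g with hR
  have hprops : ∀ c ∈ R, pvInb n m h_ c ∧ pvGet? g c = some 0 := by
    intro c hcm
    have := (pv_sweep_mem n m h_ g c).mp (hR ▸ hcm)
    exact ⟨this.1, this.2.1⟩
  have happ : applyRipen g R = pvMark (fun x => decide (x ∈ R)) g := by
    refine pvApply_eq_mark R g fun c hcm => ?_
    obtain ⟨⟨b1, _, b2, _, b3, _⟩, _⟩ := hprops c hcm
    exact ⟨b1, b2, b3⟩
  rw [happ]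
  obtain ⟨c, R', hcons⟩ : ∃ c R', R = c :: R' := by
    cases hx : R with
    | nil => exact absurd hx hne
    | cons a l => exact ⟨a, l, rfl⟩
  have hcm : c ∈ R := hcons ▸ List.mem_cons_self
  obtain ⟨hin, h0⟩ := hprops c hcm
  have := pv_countP_succ_le (pvCells n m h_)
    (fun x => decide (pvGet? g x = some 0))
    (fun x => decide (pvGet? (pvMark (fun x => decide (x ∈ R)) g) x = some 0)) c
    ((pv_mem_cells n m h_ c).mpr hin) (by simp [h0]) (by simp [pvGet_mark, hcm, h0]) ?_
  · unfold pvZ; omega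
  · intro x hx
    simp only [decide_eq_true_eq] at hx ⊢
    rw [pvGet_mark] at hx
    by_cases hxm : x ∈ R
    · obtain ⟨_, hx0⟩ := hprops x hxm
      rw [hx0] at hx; simp [hxm] at hx
    · cases hg : pvGet? g x with
      | none => rw [hg] at hx; simp at hx
      | some v => rw [hg] at hx; simp [hxm] at hx; simp [hg, hx]

-- B's day loop: sweep until nothing ripens
def loopB (n m h_ : Int) (g : List (List (List Int))) (day : Int) :
    List (List (List Int)) × Int :=
  let r := sweepList n m h_ g
  if hr : r = [] then (g, day)
  else loopB n m h_ (applyRipen g r) (day + 1)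
termination_by pvZ n m h_ g
decreasing_by
  exact pv_sweep_apply_lt n m h_ g hr

def solution_alt (n : Int) (m : Int) (h_ : Int) (storage : List (List (List Int))) : Int :=
  let cells := pvCells n m h_
  let r := loopB n m h_ storage 0
  if cells.any (fun c => decide (pvGet? r.1 c = some 0)) then -1 else r.2

-- ===== PRECONDITION & SPEC =====
-- Pre_ excludes exactly the inputs on which Python A raises IndexError: when all three extents
-- are positive, both programs read storage[i][j][k] for every i<h_, j<m, k<n, so the grid must
-- be at least that large; on all other inputs A returns normally.
def Pre_solution (n : Int) (m : Int) (h_ : Int) (storage : List (List (List Int))) : Prop :=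
  (0 < h_ ∧ 0 < m ∧ 0 < n) →
    (h_ ≤ (storage.length : Int) ∧
      ∀ L ∈ storage.take h_.toNat, m ≤ (L.length : Int) ∧
        ∀ r ∈ L.take m.toNat, n ≤ (r.length : Int))
instance (n : Int) (m : Int) (h_ : Int) (storage : List (List (List Int))) :
    Decidable (Pre_solution n m h_ storage) := by unfold Pre_solution; infer_instance

def pvWitness_solution : Int × Int × Int × List (List (List Int)) :=
  (2, 1, 1, [[[1, 0]]])

def Spec_solution (n : Int) (m : Int) (h_ : Int) (storage : List (List (List Int))) (out : Int) : Prop := out = solution_alt n m h_ storage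
instance (n : Int) (m : Int) (h_ : Int) (storage : List (List (List Int))) (out : Int) : Decidable (Spec_solution n m h_ storage out) := by unfold Spec_solution; infer_instance

-- ===== CLAIM =====
def Claim_equal_solution : Prop := ∀ (n : Int) (m : Int) (h_ : Int) (storage : List (List (List Int))), Dom_solution n m h_ storage → Pre_solution n m h_ storage → Spec_solution n m h_ storage (solution n m h_ storage)

-- ===== LEMMAS AND PROOFS =====

theorem pv_nodup_cells (n m h_ : Int) : (pvCells n m h_).Nodup := by
  unfold pvCells
  rw [List.nodup_flatMap]
  refine ⟨fun i _ => ?_, ?_⟩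
  · rw [List.nodup_flatMap]
    refine ⟨fun j _ => ?_, ?_⟩
    · refine List.Nodup.map ?_ (PySem.List.nodup_pyRange_one 0 n)
      intro a b hab
      simpa using congrArg (fun t => t.2.2) hab
    · refine (PySem.List.pairwise_lt_pyRange_one 0 m).imp ?_
      intro a b hab x hx1 hx2
      simp only [List.mem_map] at hx1 hx2
      obtain ⟨k1, _, hk1⟩ := hx1
      obtain ⟨k2, _, hk2⟩ := hx2
      have := (congrArg (fun t => t.2.1) hk1).trans (congrArg (fun t => t.2.1) hk2).symm
      simp at this
      omega
  · refine (PySem.List.pairwise_lt_pyRange_one 0 h_).imp ?_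
    intro a b hab x hx1 hx2
    simp only [List.mem_flatMap, List.mem_map] at hx1 hx2
    obtain ⟨j1, _, k1, _, hk1⟩ := hx1
    obtain ⟨j2, _, k2, _, hk2⟩ := hx2
    have := (congrArg (fun t => t.1) hk1).trans (congrArg (fun t => t.1) hk2).symm
    simp at this
    omega
-- countP splits along a second predicate
theorem pv_countP_partition {α : Type} (l : List α) (p q : α → Bool) :
    l.countP (fun x => p x && q x) + l.countP (fun x => p x && !q x) = l.countP p := by
  induction l with
  | nil => rfl
  | cons x xs ih =>
    by_cases hp : p x <;> by_cases hq : q x <;>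
      simp [List.countP_cons, hp, hq] <;> omega
-- marking a nodup batch of in-bounds unripe cells removes exactly its length
theorem pvZ_mark_sub (n m h_ : Int) (g : List (List (List Int)))
    (R : List (Int × Int × Int)) (hN : R.Nodup)
    (hR : ∀ c ∈ R, pvInb n m h_ c ∧ pvGet? g c = some 0) :
    pvZ n m h_ (pvMark (fun x => decide (x ∈ R)) g) + R.length = pvZ n m h_ g := by
  have hpt : ∀ x, (decide (pvGet? (pvMark (fun y => decide (y ∈ R)) g) x = some 0) : Bool)
      = (decide (pvGet? g x = some 0) && !(decide (x ∈ R))) := by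
    intro x
    by_cases hm : x ∈ R
    · obtain ⟨_, h0⟩ := hR x hm
      simp [pvGet_mark, hm, h0]
    · cases hg : pvGet? g x with
      | none => simp [pvGet_mark, hg, hm]
      | some v => simp [pvGet_mark, hg, hm]
  unfold pvZ
  rw [List.countP_congr (fun x _ => by rw [hpt x])]
  have hpart := pv_countP_partition (pvCells n m h_)
    (fun x => decide (pvGet? g x = some 0)) (fun x => decide (x ∈ R))
  have hcR : (pvCells n m h_).countP
        (fun x => decide (pvGet? g x = some 0) && decide (x ∈ R))
      = (pvCells n m h_).countP (fun x => decide (x ∈ R)) := by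
    refine List.countP_congr fun x _ => ?_
    by_cases hm : x ∈ R
    · simp [hm, (hR x hm).2]
    · simp [hm]
  have hlen : (pvCells n m h_).countP (fun x => decide (x ∈ R)) = R.length := by
    rw [List.countP_eq_length_filter]
    have hperm : List.Perm ((pvCells n m h_).filter (fun x => decide (x ∈ R))) R := by
      apply List.perm_of_nodup_nodup_toFinset_eq
        (List.Nodup.filter _ (pv_nodup_cells n m h_)) hN
      ext a
      simp only [List.mem_toFinset, List.mem_filter, decide_eq_true_eq]
      constructor
      · exact fun h => h.2
      · intro ha
        exact ⟨(pv_mem_cells n m h_ a).mpr (hR a ha).1, ha⟩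
    exact hperm.length_eq
  omega

-- every delta has its inverse among the deltas
theorem pv_deltas_neg : ∀ d ∈ pvDeltas, ∃ d' ∈ pvDeltas,
    ∀ c : Int × Int × Int, pvNbr (pvNbr c d) d' = c := by
  intro d hd
  fin_cases hd
  · exact ⟨(-1, 0, 0), by simp [pvDeltas], fun c => by simp [pvNbr]⟩
  · exact ⟨(1, 0, 0), by simp [pvDeltas], fun c => by simp [pvNbr]⟩
  · exact ⟨(0, -1, 0), by simp [pvDeltas], fun c => by simp [pvNbr]⟩
  · exact ⟨(0, 1, 0), by simp [pvDeltas], fun c => by simp [pvNbr]⟩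
  · exact ⟨(0, 0, -1), by simp [pvDeltas], fun c => by simp [pvNbr]⟩
  · exact ⟨(0, 0, 1), by simp [pvDeltas], fun c => by simp [pvNbr]⟩

-- the scan is: ripe cells in scan order, count of unripe cells
theorem pv_scan_eq (n m h_ : Int) (g : List (List (List Int))) :
    pvScan n m h_ g =
      ((pvCells n m h_).filter (fun c => decide (pvGet? g c = some 1)),
        (pvZ n m h_ g : Int)) := by
  have hstep : pvScan n m h_ g = (pvCells n m h_).foldl
      (fun acc c =>
        if pvGet? g c = some 1 then (acc.1 ++ [c], acc.2)
        else if pvGet? g c = some 0 then (acc.1, acc.2 + 1)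
        else acc) ([], 0) := by
    rw [pvCells]
    simp only [List.foldl_flatMap, List.foldl_map]
    rfl
  have hgen : ∀ (l : List (Int × Int × Int)) (A : List (Int × Int × Int)) (B : Int),
      l.foldl (fun acc c =>
        if pvGet? g c = some 1 then (acc.1 ++ [c], acc.2)
        else if pvGet? g c = some 0 then (acc.1, acc.2 + 1)
        else acc) (A, B)
        = (A ++ l.filter (fun c => decide (pvGet? g c = some 1)),
            B + (l.countP (fun c => decide (pvGet? g c = some 0)) : Int)) := by
    intro l
    induction l with
    | nil => intro A B; simp
    | cons c l ih =>
      intro A B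
      simp only [List.foldl_cons, List.filter_cons, List.countP_cons]
      by_cases h1 : pvGet? g c = some 1
      · have h0 : ¬(pvGet? g c = some 0) := by simp [h1]
        simp only [ih, h1, h0]
        simp [List.append_assoc]
      · by_cases h0 : pvGet? g c = some 0
        · simp only [if_neg h1, if_pos h0, ih, h1, h0]
          simp
          omega
        · simp only [if_neg h1, if_neg h0, ih, h1, h0]
          simp
  rw [hstep, hgen]
  simp [pvZ]

-- the six delta steps of one pop, in mark normal form
theorem pv_foldA_mark (n m h_ : Int) (g0 : List (List (List Int))) (p : Int × Int × Int) :
    ∀ (ds : List (Int × Int × Int)) (prod q : List (Int × Int × Int)) (u : Int),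
      prod.Nodup →
      (∀ c ∈ prod, pvInb n m h_ c ∧ pvGet? g0 c = some 0) →
      ∃ new,
        ds.foldl (stepA n m h_ p) (pvMark (fun x => decide (x ∈ prod)) g0, q, u)
          = (pvMark (fun x => decide (x ∈ prod ++ new)) g0, q ++ new,
              u - (new.length : Int)) ∧
        (prod ++ new).Nodup ∧
        (∀ c ∈ new, pvInb n m h_ c ∧ pvGet? g0 c = some 0 ∧ ∃ d ∈ ds, pvNbr p d = c) ∧
        (∀ d ∈ ds, pvInb n m h_ (pvNbr p d) → pvGet? g0 (pvNbr p d) = some 0 →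
          pvNbr p d ∈ prod ++ new) := by
  intro ds
  induction ds with
  | nil =>
    intro prod q u hN hP
    exact ⟨[], by simp, by simp [hN], by simp, by simp⟩
  | cons d ds ih =>
    intro prod q u hN hP
    simp only [List.foldl_cons]
    by_cases hb : (pvNbr p d).1 < 0 ∨ (pvNbr p d).1 ≥ h_ ∨ (pvNbr p d).2.1 < 0 ∨
        (pvNbr p d).2.1 ≥ m ∨ (pvNbr p d).2.2 < 0 ∨ (pvNbr p d).2.2 ≥ n
    · have hstep : stepA n m h_ p (pvMark (fun x => decide (x ∈ prod)) g0, q, u) d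
          = (pvMark (fun x => decide (x ∈ prod)) g0, q, u) := by
        unfold stepA
        simp only [if_pos hb]
      rw [hstep]
      obtain ⟨new, h1, h2, h3, h4⟩ := ih prod q u hN hP
      refine ⟨new, h1, h2, fun c hc => ?_, fun d' hd' => ?_⟩
      · obtain ⟨ha, hb', d', hd', he⟩ := h3 c hc
        exact ⟨ha, hb', d', List.mem_cons_of_mem d hd', he⟩
      · rcases List.mem_cons.mp hd' with rfl | hd''
        · intro hin _
          unfold pvInb at hin
          exact absurd hb (by omega)
        · exact h4 d' hd''
    · have hin : pvInb n m h_ (pvNbr p d) := by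
        unfold pvInb
        push_neg at hb
        omega
      cases hg : pvGet? g0 (pvNbr p d) with
      | none =>
        have hstep : stepA n m h_ p (pvMark (fun x => decide (x ∈ prod)) g0, q, u) d
            = (pvMark (fun x => decide (x ∈ prod)) g0, q, u) := by
          unfold stepA
          simp only [if_neg hb]
          rw [pvGet_mark, hg]
          simp
        rw [hstep]
        obtain ⟨new, h1, h2, h3, h4⟩ := ih prod q u hN hP
        refine ⟨new, h1, h2, fun c hc => ?_, fun d' hd' => ?_⟩
        · obtain ⟨ha, hb', d', hd', he⟩ := h3 c hc
          exact ⟨ha, hb', d', List.mem_cons_of_mem d hd', he⟩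
        · rcases List.mem_cons.mp hd' with rfl | hd''
          · intro _ h0
            rw [hg] at h0
            exact absurd h0 (by simp)
          · exact h4 d' hd''
      | some v =>
        by_cases hm : pvNbr p d ∈ prod
        · have hstep : stepA n m h_ p (pvMark (fun x => decide (x ∈ prod)) g0, q, u) d
              = (pvMark (fun x => decide (x ∈ prod)) g0, q, u) := by
            unfold stepA
            simp only [if_neg hb]
            rw [pvGet_mark, hg]
            simp [hm]
          rw [hstep]
          obtain ⟨new, h1, h2, h3, h4⟩ := ih prod q u hN hP
          refine ⟨new, h1, h2, fun c hc => ?_, fun d' hd' => ?_⟩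
          · obtain ⟨ha, hb', d', hd', he⟩ := h3 c hc
            exact ⟨ha, hb', d', List.mem_cons_of_mem d hd', he⟩
          · rcases List.mem_cons.mp hd' with rfl | hd''
            · intro _ _
              exact List.mem_append_left _ hm
            · exact h4 d' hd''
        · by_cases hv : v = 0
          · subst hv
            have hstep : stepA n m h_ p (pvMark (fun x => decide (x ∈ prod)) g0, q, u) d
                = (pvMark (fun x => decide (x ∈ prod ++ [pvNbr p d])) g0,
                    q ++ [pvNbr p d], u - 1) := by
              unfold stepA
              simp only [if_neg hb]
              rw [pvGet_mark, hg]
              simp only [Option.map_some, hm, decide_false, Bool.false_eq_true, if_false,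
                if_pos rfl]
              rw [pvSet_eq_mark _ _ hin.1 hin.2.2.1 hin.2.2.2.2.1, pvMark_mark]
              rw [pvMark_congr (Q := fun x => decide (x ∈ prod ++ [pvNbr p d]))
                (fun x => by by_cases h1 : x = pvNbr p d <;>
                  by_cases h2 : x ∈ prod <;> simp [h1, h2])]
              simp
            rw [hstep]
            have hN' : (prod ++ [pvNbr p d]).Nodup := by
              rw [List.nodup_append]
              refine ⟨hN, List.nodup_singleton _, ?_⟩
              intro x hx y hy
              rw [List.mem_singleton] at hy
              subst hy
              intro he
              exact hm (he ▸ hx)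
            have hP' : ∀ c ∈ prod ++ [pvNbr p d],
                pvInb n m h_ c ∧ pvGet? g0 c = some 0 := by
              intro c hc
              rcases List.mem_append.mp hc with hc' | hc'
              · exact hP c hc'
              · rw [List.mem_singleton] at hc'
                subst hc'
                exact ⟨hin, hg⟩
            obtain ⟨new, h1, h2, h3, h4⟩ := ih (prod ++ [pvNbr p d]) (q ++ [pvNbr p d])
              (u - 1) hN' hP'
            have hl1 : prod ++ pvNbr p d :: new = (prod ++ [pvNbr p d]) ++ new := by simp
            have hl2 : q ++ pvNbr p d :: new = (q ++ [pvNbr p d]) ++ new := by simp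
            refine ⟨pvNbr p d :: new, ?_, ?_, fun c hc => ?_, fun d' hd' => ?_⟩
            · rw [hl1, hl2]
              have harith : u - ((pvNbr p d :: new).length : Int)
                  = (u - 1) - (new.length : Int) := by
                simp only [List.length_cons]
                push_cast
                ring
              rw [harith]
              exact h1
            · rw [hl1]
              exact h2
            · rcases List.mem_cons.mp hc with rfl | hc'
              · exact ⟨hin, hg, d, List.mem_cons_self, rfl⟩
              · obtain ⟨ha, hb', d', hd', he⟩ := h3 c hc'
                exact ⟨ha, hb', d', List.mem_cons_of_mem d hd', he⟩
            · rcases List.mem_cons.mp hd' with rfl | hd''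
              · intro _ _
                rw [hl1]
                exact List.mem_append_left _ (List.mem_append_right _ List.mem_cons_self)
              · intro ha hb'
                rw [hl1]
                exact h4 d' hd'' ha hb'
          · have hstep : stepA n m h_ p (pvMark (fun x => decide (x ∈ prod)) g0, q, u) d
                = (pvMark (fun x => decide (x ∈ prod)) g0, q, u) := by
              unfold stepA
              simp only [if_neg hb]
              rw [pvGet_mark, hg]
              simp [hm, hv]
            rw [hstep]
            obtain ⟨new, h1, h2, h3, h4⟩ := ih prod q u hN hP
            refine ⟨new, h1, h2, fun c hc => ?_, fun d' hd' => ?_⟩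
            · obtain ⟨ha, hb', d', hd', he⟩ := h3 c hc
              exact ⟨ha, hb', d', List.mem_cons_of_mem d hd', he⟩
            · rcases List.mem_cons.mp hd' with rfl | hd''
              · intro _ h0
                rw [hg] at h0
                exact absurd h0 (by simp [hv])
              · exact h4 d' hd''

-- one whole wave of A, in mark normal form
theorem pv_innerA_mark (n m h_ : Int) (g0 : List (List (List Int))) :
    ∀ (rem done prod : List (Int × Int × Int)) (u : Int),
      prod.Nodup →
      (∀ c, c ∈ prod ↔ (pvInb n m h_ c ∧ pvGet? g0 c = some 0 ∧
        ∃ p ∈ done, ∃ d ∈ pvDeltas, pvNbr p d = c)) →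
      ∃ new,
        innerA n m h_ rem.length (pvMark (fun x => decide (x ∈ prod)) g0) (rem ++ prod) u
          = (pvMark (fun x => decide (x ∈ prod ++ new)) g0, prod ++ new,
              u - (new.length : Int)) ∧
        (prod ++ new).Nodup ∧
        (∀ c, c ∈ prod ++ new ↔ (pvInb n m h_ c ∧ pvGet? g0 c = some 0 ∧
          ∃ p ∈ done ++ rem, ∃ d ∈ pvDeltas, pvNbr p d = c)) := by
  intro rem
  induction rem with
  | nil =>
    intro done prod u hN hmem
    refine ⟨[], by simp [innerA], by simp [hN], ?_⟩
    simpa using hmem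
  | cons p rem' ih =>
    intro done prod u hN hmem
    have hPprod : ∀ c ∈ prod, pvInb n m h_ c ∧ pvGet? g0 c = some 0 := by
      intro c hc
      have := (hmem c).mp hc
      exact ⟨this.1, this.2.1⟩
    obtain ⟨new1, hst, hN1, hnew1, hcomp⟩ :=
      pv_foldA_mark n m h_ g0 p pvDeltas (prod) ((rem' ++ prod)) u hN hPprod
    have hmem' : ∀ c, c ∈ prod ++ new1 ↔ (pvInb n m h_ c ∧ pvGet? g0 c = some 0 ∧
        ∃ p' ∈ done ++ [p], ∃ d ∈ pvDeltas, pvNbr p' d = c) := by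
      intro c
      constructor
      · intro hc
        rcases List.mem_append.mp hc with hc' | hc'
        · obtain ⟨ha, hb, p', hp', d, hd, he⟩ := (hmem c).mp hc'
          exact ⟨ha, hb, p', List.mem_append_left _ hp', d, hd, he⟩
        · obtain ⟨ha, hb, d, hd, he⟩ := hnew1 c hc'
          exact ⟨ha, hb, p, List.mem_append_right _ List.mem_cons_self, d, hd, he⟩
      · rintro ⟨ha, hb, p', hp', d, hd, he⟩
        rcases List.mem_append.mp hp' with hp'' | hp''
        · exact List.mem_append_left _ ((hmem c).mpr ⟨ha, hb, p', hp'', d, hd, he⟩)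
        · rw [List.mem_singleton] at hp''
          subst hp''
          subst he
          exact hcomp d hd ha hb
    obtain ⟨new2, h1', h2', h3'⟩ := ih (done ++ [p]) (prod ++ new1)
      (u - (new1.length : Int)) hN1 hmem'
    refine ⟨new1 ++ new2, ?_, ?_, ?_⟩
    · show innerA n m h_ (rem'.length + 1)
        (pvMark (fun x => decide (x ∈ prod)) g0) (p :: (rem' ++ prod)) u = _
      rw [show innerA n m h_ (rem'.length + 1)
          (pvMark (fun x => decide (x ∈ prod)) g0) (p :: (rem' ++ prod)) u
        = innerA n m h_ rem'.length
            ((pvDeltas.foldl (stepA n m h_ p)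
              (pvMark (fun x => decide (x ∈ prod)) g0, rem' ++ prod, u))).1
            ((pvDeltas.foldl (stepA n m h_ p)
              (pvMark (fun x => decide (x ∈ prod)) g0, rem' ++ prod, u))).2.1
            ((pvDeltas.foldl (stepA n m h_ p)
              (pvMark (fun x => decide (x ∈ prod)) g0, rem' ++ prod, u))).2.2 from rfl]
      rw [hst]
      dsimp only
      rw [show (rem' ++ prod) ++ new1 = rem' ++ (prod ++ new1) from by simp]
      rw [h1']
      have harith : u - (new1.length : Int) - (new2.length : Int)
          = u - ((new1 ++ new2).length : Int) := by
        simp only [List.length_append]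
        push_cast
        ring
      rw [harith, List.append_assoc]
    · rw [← List.append_assoc]
      exact h2'
    · intro c
      rw [← List.append_assoc]
      rw [h3' c]
      constructor
      · rintro ⟨ha, hb, p', hp', hrest⟩
        refine ⟨ha, hb, p', ?_, hrest⟩
        rcases List.mem_append.mp hp' with hp'' | hp''
        · rcases List.mem_append.mp hp'' with h | h
          · exact List.mem_append_left _ h
          · rw [List.mem_singleton] at h
            subst h
            exact List.mem_append_right _ List.mem_cons_self
        · exact List.mem_append_right _ (List.mem_cons_of_mem _ hp'')
      · rintro ⟨ha, hb, p', hp', hrest⟩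
        refine ⟨ha, hb, p', ?_, hrest⟩
        rcases List.mem_append.mp hp' with h | h
        · exact List.mem_append_left _ (List.mem_append_left _ h)
        · rcases List.mem_cons.mp h with rfl | h'
          · exact List.mem_append_left _ (List.mem_append_right _ List.mem_cons_self)
          · exact List.mem_append_right _ h' 

-- with the frontier invariant, a wave's output is exactly the sweep of the wave-start grid
theorem pv_wave_eq_sweep (n m h_ : Int) (g : List (List (List Int)))
    (q : List (Int × Int × Int))
    (hq : ∀ p ∈ q, pvInb n m h_ p ∧ pvGet? g p = some 1)
    (hcl : ∀ c, pvInb n m h_ c → pvGet? g c = some 1 → c ∉ q →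
      ∀ d ∈ pvDeltas, ¬(pvInb n m h_ (pvNbr c d) ∧ pvGet? g (pvNbr c d) = some 0)) :
    ∀ c, (c ∈ sweepList n m h_ g ↔ (pvInb n m h_ c ∧ pvGet? g c = some 0 ∧
      ∃ p ∈ q, ∃ d ∈ pvDeltas, pvNbr p d = c)) := by
  intro c
  rw [pv_sweep_mem]
  constructor
  · rintro ⟨hin, h0, d, hd, hnin, hn1⟩
    refine ⟨hin, h0, ?_⟩
    set p := pvNbr c d with hp
    obtain ⟨d', hd', hinv⟩ := pv_deltas_neg d hd
    by_cases hpq : p ∈ q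
    · exact ⟨p, hpq, d', hd', hinv c⟩
    · exact absurd ⟨hin, h0⟩ (hinv c ▸ hcl p hnin hn1 hpq d' hd')
  · rintro ⟨hin, h0, p, hpq, d, hd, hrfl⟩
    refine ⟨hin, h0, ?_⟩
    obtain ⟨d', hd', hinv⟩ := pv_deltas_neg d hd
    obtain ⟨hpin, hp1⟩ := hq p hpq
    exact ⟨d', hd', by rw [← hrfl, hinv]; exact ⟨hpin, hp1⟩⟩

-- the two loops agree under the frontier invariant
theorem pv_loopAB (n m h_ : Int) :
    ∀ (N : Nat) (g : List (List (List Int))) (q : List (Int × Int × Int)) (u day : Int),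
      pvZ n m h_ g ≤ N →
      (∀ p ∈ q, pvInb n m h_ p ∧ pvGet? g p = some 1) →
      (∀ c, pvInb n m h_ c → pvGet? g c = some 1 → c ∉ q →
        ∀ d ∈ pvDeltas, ¬(pvInb n m h_ (pvNbr c d) ∧ pvGet? g (pvNbr c d) = some 0)) →
      loopA n m h_ g q u day =
        (u - (pvZ n m h_ g : Int) + (pvZ n m h_ (loopB n m h_ g day).1 : Int),
          (loopB n m h_ g day).2) := by
  intro N
  induction N using Nat.strong_induction_on with
  | _ N ih =>
  intro g q u day hZ hq hcl
  have hALnil : ∀ (g' : List (List (List Int))) (u' day' : Int),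
      loopA n m h_ g' [] u' day' = (u', day') := by
    intro g' u' day'
    rw [loopA]
    simp
  by_cases hqe : q = []
  · subst hqe
    have hsw : sweepList n m h_ g = [] := by
      rw [List.eq_nil_iff_forall_not_mem]
      intro c hcm
      obtain ⟨hin, h0, d, hd, hnin, hn1⟩ := (pv_sweep_mem n m h_ g c).mp hcm
      obtain ⟨d', hd', hinv⟩ := pv_deltas_neg d hd
      have := hcl (pvNbr c d) hnin hn1 (List.not_mem_nil) d' hd'
      rw [hinv c] at this
      exact this ⟨hin, h0⟩
    rw [loopB]
    simp only [hsw]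
    rw [hALnil]
    simp
  · obtain ⟨R, h1, h2, h3⟩ := pv_innerA_mark n m h_ g q [] [] u List.nodup_nil
      (by intro c; simp)
    have hmk0 : pvMark (fun x => decide (x ∈ ([] : List (Int × Int × Int)))) g = g :=
      pvMark_false (fun _ => by simp) g
    rw [hmk0, List.append_nil] at h1
    simp only [List.nil_append, List.length_nil] at h1 h2 h3
    have hbr : ∀ c, c ∈ sweepList n m h_ g ↔ c ∈ R := by
      intro c
      rw [pv_wave_eq_sweep n m h_ g q hq hcl c, h3 c]
    have hRprops : ∀ c ∈ R, pvInb n m h_ c ∧ pvGet? g c = some 0 := by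
      intro c hc
      have := (h3 c).mp hc
      exact ⟨this.1, this.2.1⟩
    rw [loopA]
    rw [dif_neg hqe]
    simp only [h1]
    by_cases hRe : R = []
    · subst hRe
      have hsw : sweepList n m h_ g = [] := by
        rw [List.eq_nil_iff_forall_not_mem]
        intro c hcm
        exact (List.not_mem_nil) ((hbr c).mp hcm)
      rw [loopB]
      simp only [hsw, List.append_nil, List.nil_append, List.length_nil]
      rw [hALnil]
      simp
    · have hswne : sweepList n m h_ g ≠ [] := by
        intro hc
        obtain ⟨c, R', rfl⟩ : ∃ c R', R = c :: R' := by
          cases hx : R with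
          | nil => exact absurd hx hRe
          | cons a l => exact ⟨a, l, rfl⟩
        exact (List.not_mem_nil (a := c)) (hc ▸ (hbr c).mpr List.mem_cons_self)
      have happ : applyRipen g (sweepList n m h_ g)
          = pvMark (fun x => decide (x ∈ sweepList n m h_ g)) g := by
        refine pvApply_eq_mark _ g fun c hcm => ?_
        obtain ⟨⟨b1, _, b2, _, b3, _⟩, _⟩ := hRprops c ((hbr c).mp hcm)
        exact ⟨b1, b2, b3⟩
      have hmk_eq : pvMark (fun x => decide (x ∈ sweepList n m h_ g)) g
          = pvMark (fun x => decide (x ∈ R)) g :=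
        pvMark_congr (fun x => decide_eq_decide.mpr (hbr x)) g
      have hZsub := pvZ_mark_sub n m h_ g R h2 hRprops
      have hInv1 : ∀ p ∈ R, pvInb n m h_ p ∧
          pvGet? (pvMark (fun x => decide (x ∈ R)) g) p = some 1 := by
        intro p hp
        obtain ⟨hin, h0⟩ := hRprops p hp
        refine ⟨hin, ?_⟩
        rw [pvGet_mark, h0]
        simp [hp]
      have hInv2 : ∀ c, pvInb n m h_ c →
          pvGet? (pvMark (fun x => decide (x ∈ R)) g) c = some 1 → c ∉ R →
          ∀ d ∈ pvDeltas, ¬(pvInb n m h_ (pvNbr c d) ∧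
            pvGet? (pvMark (fun x => decide (x ∈ R)) g) (pvNbr c d) = some 0) := by
        intro c hin h1c hnc d hd hcontra
        obtain ⟨hnin, hn0⟩ := hcontra
        rw [pvGet_mark] at h1c hn0
        have hnotR : pvNbr c d ∉ R := by
          intro hmem
          obtain ⟨_, h0'⟩ := hRprops _ hmem
          rw [h0'] at hn0
          simp [hmem] at hn0
        have hn0' : pvGet? g (pvNbr c d) = some 0 := by
          cases hg : pvGet? g (pvNbr c d) with
          | none => rw [hg] at hn0; simp at hn0
          | some v =>
            rw [hg] at hn0
            simp [hnotR] at hn0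
            rw [hn0]
        have h1c' : pvGet? g c = some 1 := by
          cases hg : pvGet? g c with
          | none => rw [hg] at h1c; simp at h1c
          | some v =>
            rw [hg] at h1c
            simp [hnc] at h1c
            rw [h1c]
        obtain ⟨d', hd', hinv⟩ := pv_deltas_neg d hd
        have : pvNbr c d ∈ R := by
          refine (hbr _).mp ((pv_sweep_mem n m h_ g _).mpr ⟨hnin, hn0', d', hd', ?_⟩)
          rw [hinv c]
          exact ⟨hin, h1c'⟩
        exact hnotR this
      obtain ⟨c0, R0, hR0⟩ : ∃ c R', R = c :: R' := by
        cases hx : R with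
        | nil => exact absurd hx hRe
        | cons a l => exact ⟨a, l, rfl⟩
      have hRlen : 1 ≤ R.length := by
        rw [hR0]
        simp
      have hZlt : pvZ n m h_ (pvMark (fun x => decide (x ∈ R)) g) < pvZ n m h_ g := by
        omega
      have hrec := ih (pvZ n m h_ (pvMark (fun x => decide (x ∈ R)) g)) (by omega)
        (pvMark (fun x => decide (x ∈ R)) g) R (u - (R.length : Int)) (day + 1)
        (le_refl _) hInv1 hInv2
      have hBunf : loopB n m h_ g day
          = loopB n m h_ (pvMark (fun x => decide (x ∈ R)) g) (day + 1) := by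
        rw [loopB]
        rw [dif_neg hswne, happ, hmk_eq]
      rw [hBunf]
      rw [if_neg hRe]
      refine hrec.trans ?_
      rw [Prod.mk.injEq]
      refine ⟨?_, rfl⟩
      omega

-- ===== VERDICT =====
theorem solution_spec : Claim_equal_solution := by
  intro n m h_ storage _ _
  unfold Spec_solution solution solution_alt
  rw [pv_scan_eq]
  dsimp only
  by_cases hz : ((pvZ n m h_ storage : Int)) = 0
  · rw [if_pos hz]
    have hzn : pvZ n m h_ storage = 0 := by exact_mod_cast hz
    have hnozero : ∀ c ∈ pvCells n m h_, ¬(pvGet? storage c = some 0) := by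
      intro c hc h0
      have : 0 < pvZ n m h_ storage :=
        List.countP_pos_iff.mpr ⟨c, hc, by simp [h0]⟩
      omega
    have hsw : sweepList n m h_ storage = [] := by
      rw [List.eq_nil_iff_forall_not_mem]
      intro c hc
      obtain ⟨hin, h0, _⟩ := (pv_sweep_mem n m h_ storage c).mp hc
      exact hnozero c ((pv_mem_cells n m h_ c).mpr hin) h0
    have hB : loopB n m h_ storage 0 = (storage, 0) := by
      rw [loopB]
      simp [hsw]
    rw [hB]
    have hany : (pvCells n m h_).any
        (fun c => decide (pvGet? storage c = some 0)) = false := by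
      simp only [List.any_eq_false, decide_eq_true_eq]
      exact hnozero
    rw [hany]
    simp
  · rw [if_neg hz]
    have hq : ∀ p ∈ (pvCells n m h_).filter
        (fun c => decide (pvGet? storage c = some 1)),
        pvInb n m h_ p ∧ pvGet? storage p = some 1 := by
      intro p hp
      rw [List.mem_filter] at hp
      exact ⟨(pv_mem_cells n m h_ p).mp hp.1, by simpa using hp.2⟩
    have hcl : ∀ c, pvInb n m h_ c → pvGet? storage c = some 1 →
        c ∉ (pvCells n m h_).filter (fun c => decide (pvGet? storage c = some 1)) →
        ∀ d ∈ pvDeltas, ¬(pvInb n m h_ (pvNbr c d) ∧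
          pvGet? storage (pvNbr c d) = some 0) := by
      intro c hin h1 hnc
      exfalso
      apply hnc
      rw [List.mem_filter]
      exact ⟨(pv_mem_cells n m h_ c).mpr hin, by simp [h1]⟩
    have hmain := pv_loopAB n m h_ (pvZ n m h_ storage) storage
      ((pvCells n m h_).filter (fun c => decide (pvGet? storage c = some 1)))
      ((pvZ n m h_ storage : Int)) 0 (le_refl _) hq hcl
    simp only [hmain]
    have hzz : ((pvZ n m h_ storage : Int)) - ((pvZ n m h_ storage : Int))
        + ((pvZ n m h_ (loopB n m h_ storage 0).1 : Int))
        = ((pvZ n m h_ (loopB n m h_ storage 0).1 : Int)) := by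
      ring
    rw [hzz]
    by_cases hf : (pvCells n m h_).any
        (fun c => decide (pvGet? (loopB n m h_ storage 0).1 c = some 0)) = true
    · have hpos : (0 : Int) < (pvZ n m h_ (loopB n m h_ storage 0).1 : Int) := by
        obtain ⟨c, hc, hp⟩ := List.any_eq_true.mp hf
        have : 0 < pvZ n m h_ (loopB n m h_ storage 0).1 :=
          List.countP_pos_iff.mpr ⟨c, hc, hp⟩
        exact_mod_cast this
      rw [if_pos (by omega), if_pos hf]
    · have hzero : pvZ n m h_ (loopB n m h_ storage 0).1 = 0 := by
        rw [pvZ, List.countP_eq_zero]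
        intro c hc
        simp only [Bool.not_eq_true]
        rcases Bool.eq_false_or_eq_true
          (decide (pvGet? (loopB n m h_ storage 0).1 c = some 0)) with h | h
        · exact absurd (List.any_eq_true.mpr ⟨c, hc, h⟩) hf
        · exact h
      rw [hzero]
      rw [if_neg (by omega), if_neg hf]
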